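-- pv_equiv track=rewrite | github.com/alexandre-aco-code/codinGame | puzzles_faciles/unary.py | to_unary
-- ===== SOURCE A (Python) =====
-- def to_unary(text) -> str:
--     unary_text = ""
--     prev_digit = False  # False = 0, True = 1
--     # handle first character
--     if len(text) >= 1:
--         if text[0] == "0":
--             unary_text += "00 0"
--         else:
--             unary_text += "0 0"
--             prev_digit = True
--
--     for i in range(1, len(text)):
--         if text[i] == "0" and prev_digit:
--             unary_text += " 00 0"  # switch from 1 to 0
--             prev_digit = False
--         elif text[i] == "1" and not prev_digit:
--             unary_text += " 0 0"  # switch from 0 to 1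
--             prev_digit = True
--         else:
--             unary_text += "0"  # repeat digit
--     return unary_text
-- ===== SOURCE B (Python) =====
-- def to_unary(text) -> str:
--     if not text:
--         return ""
--     # effective digit state per position (non-'0' first char acts as 1;
--     # later stray chars keep the previous state, matching the task's rule)
--     states = []
--     s = 0 if text[0] == "0" else 1
--     states.append(s)
--     for c in text[1:]:
--         if c == "0":
--             s = 0
--         elif c == "1":
--             s = 1
--         states.append(s)
--     # run-length encode the state sequence
--     runs = []
--     d = states[0]
--     k = 1
--     for b in states[1:]:
--         if b == d:
--             k += 1
--         else:
--             runs.append((d, k))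
--             d, k = b, 1
--     runs.append((d, k))
--     return " ".join(("00 0" if rd == 0 else "0 0") + "0" * (rk - 1) for rd, rk in runs)
-- ===== Notes on version B (the rewrite author's own statement) =====
-- stated objective: alternative
-- what changed: Replaced A's single char-by-char loop that appends tokens while tracking a previous-digit flag by a pipeline: derive the effective digit state per position, run-length encode that state sequence, then render each run as its header plus a zero per extra repetition and join the tokens with spaces.
import Mathlib
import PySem

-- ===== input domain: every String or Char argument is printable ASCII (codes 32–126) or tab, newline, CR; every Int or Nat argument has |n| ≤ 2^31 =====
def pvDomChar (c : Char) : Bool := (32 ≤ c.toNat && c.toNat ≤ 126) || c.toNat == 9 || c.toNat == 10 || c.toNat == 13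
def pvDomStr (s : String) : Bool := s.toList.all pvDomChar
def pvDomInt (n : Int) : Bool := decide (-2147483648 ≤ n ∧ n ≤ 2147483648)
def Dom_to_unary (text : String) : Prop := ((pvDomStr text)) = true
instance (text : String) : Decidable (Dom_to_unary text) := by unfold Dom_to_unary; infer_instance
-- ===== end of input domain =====

-- B replaces A's char-by-char accumulator loop by a states / run-length / join pipeline (alternative decomposition, same cost).


-- ===== PORT A =====
-- A's for-loop over text[1:] with the string accumulator and prev_digit flag
def toUnaryLoopA : List Char → List Char → Bool → List Char
  | acc, [], _ => acc
  | acc, c :: cs, p =>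
    if c = '0' ∧ p then toUnaryLoopA (acc ++ (' ' :: '0' :: '0' :: ' ' :: '0' :: [])) cs false
    else if c = '1' ∧ ¬ p then toUnaryLoopA (acc ++ (' ' :: '0' :: ' ' :: '0' :: [])) cs true
    else toUnaryLoopA (acc ++ ['0']) cs p

def to_unary (text : String) : String :=
  match text.toList with
  | [] => ""
  | c :: rest =>
    if c = '0' then String.mk (toUnaryLoopA ('0' :: '0' :: ' ' :: '0' :: []) rest false)
    else String.mk (toUnaryLoopA ('0' :: ' ' :: '0' :: []) rest true)

-- ===== PORT B =====
-- effective digit state per position ('0' → false, '1' → true, other → keep previous)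
def altStates : List Char → Bool → List Bool
  | [], _ => []
  | c :: cs, s =>
    let s' := if c = '0' then false else if c = '1' then true else s
    s' :: altStates cs s'

-- forward run-length scan over the state sequence (current digit d, count k, runs so far)
def altRL : List Bool → Bool → Nat → List (Bool × Nat) → List (Bool × Nat)
  | [], d, k, acc => acc ++ [(d, k)]
  | b :: bs, d, k, acc =>
    if b = d then altRL bs d (k + 1) acc
    else altRL bs b 1 (acc ++ [(d, k)])

-- token for one run: header + '0' * (length - 1)
def altTok (r : Bool × Nat) : List Char :=
  (if r.1 = false then ('0' :: '0' :: ' ' :: '0' :: []) else ('0' :: ' ' :: '0' :: []))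
    ++ List.replicate (r.2 - 1) '0'

-- " ".join over the run tokens
def altRender : List (Bool × Nat) → List Char
  | [] => []
  | [r] => altTok r
  | r :: rs => altTok r ++ ' ' :: altRender rs

def to_unary_alt (text : String) : String :=
  match text.toList with
  | [] => ""
  | c :: rest =>
    let s0 : Bool := if c = '0' then false else true
    String.mk (altRender (altRL (altStates rest s0) s0 1 []))

-- ===== PRECONDITION & SPEC =====
def Spec_to_unary (text : String) (out : String) : Prop := out = to_unary_alt text
instance (text : String) (out : String) : Decidable (Spec_to_unary text out) := by unfold Spec_to_unary; infer_instance

-- ===== CLAIM (what is proved, stated in full; the proofs are below) =====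
def Claim_equal_to_unary : Prop := ∀ (text : String), Dom_to_unary text → Spec_to_unary text (to_unary text)

-- ===== LEMMAS AND PROOFS =====

-- output of A's loop as a function of the derived state sequence
def gSeq : List Bool → Bool → List Char
  | [], _ => []
  | s :: ss, p =>
    if s = p then '0' :: gSeq ss p
    else (' ' :: (if s = false then ('0' :: '0' :: ' ' :: '0' :: []) else ('0' :: ' ' :: '0' :: []))) ++ gSeq ss s

theorem loopA_eq_gSeq (cs : List Char) : ∀ (acc : List Char) (p : Bool),
    toUnaryLoopA acc cs p = acc ++ gSeq (altStates cs p) p := by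
  induction cs with
  | nil => intro acc p; simp [toUnaryLoopA, altStates, gSeq]
  | cons c cs ih =>
    intro acc p
    by_cases h0 : c = '0'
    · cases p <;> simp [toUnaryLoopA, altStates, gSeq, h0, ih]
    · by_cases h1 : c = '1'
      · cases p <;> simp [toUnaryLoopA, altStates, gSeq, h0, h1, ih]
      · cases p <;> simp [toUnaryLoopA, altStates, gSeq, h0, h1, ih]

theorem render_append_one (xs : List (Bool × Nat)) (t : Bool × Nat) :
    altRender (xs ++ [t]) =
      match xs with
      | [] => altTok t
      | _ :: _ => altRender xs ++ ' ' :: altTok t := by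
  induction xs with
  | nil => simp [altRender]
  | cons x xs ih =>
    cases xs with
    | nil => simp [altRender]
    | cons y ys =>
      simp only [List.cons_append, altRender] at *
      rw [ih]
      simp [altRender]

theorem tok_bump (d : Bool) (k : Nat) (hk : 1 ≤ k) :
    altTok (d, k + 1) = altTok (d, k) ++ ['0'] := by
  have : k - 1 + 1 = k := by omega
  simp only [altTok]
  rw [show k + 1 - 1 = (k - 1) + 1 by omega, List.replicate_succ']
  simp

theorem render_bump (xs : List (Bool × Nat)) (d : Bool) (k : Nat) (hk : 1 ≤ k) :
    altRender (xs ++ [(d, k + 1)]) = altRender (xs ++ [(d, k)]) ++ ['0'] := by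
  rw [render_append_one, render_append_one, tok_bump d k hk]
  cases xs <;> simp

theorem rl_render (bs : List Bool) : ∀ (d : Bool) (k : Nat) (acc : List (Bool × Nat)), 1 ≤ k →
    altRender (altRL bs d k acc) = altRender (acc ++ [(d, k)]) ++ gSeq bs d := by
  induction bs with
  | nil => intro d k acc hk; simp [altRL, gSeq]
  | cons b bs ih =>
    intro d k acc hk
    by_cases hb : b = d
    · subst hb
      rw [show altRL (b :: bs) b k acc = altRL bs b (k + 1) acc from by simp [altRL]]
      rw [ih b (k + 1) acc (by omega), render_bump acc b k hk]
      simp [gSeq]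
    · simp only [altRL, if_neg hb]
      rw [ih b 1 (acc ++ [(d, k)]) (le_refl 1)]
      rw [show (acc ++ [(d, k)]) ++ [(b, 1)] = acc ++ [(d, k)] ++ [(b, 1)] from rfl,
          render_append_one (acc ++ [(d, k)]) (b, 1)]
      cases acc <;> simp [gSeq, hb, altTok]

-- ===== VERDICT (by name: the statement is the Claim_ definition above) =====
theorem to_unary_spec : Claim_equal_to_unary := by
  intro text _
  unfold Spec_to_unary to_unary to_unary_alt
  cases h : text.toList with
  | nil => rfl
  | cons c rest =>
    by_cases h0 : c = '0' <;>
      simp only [h0, if_pos, if_neg, if_true, if_false, ite_true, ite_false] <;>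
      rw [loopA_eq_gSeq, rl_render _ _ 1 [] (le_refl 1)] <;>
      simp [altRender, altTok, h0]
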